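-- pv_equiv track=rewrite | github.com/daniel-reich/ubiquitous-fiesta | SwERCKpctjJDcDZRQ_21.py | longest_string
-- ===== SOURCE A (Python) =====
-- def longest_string(str1, str2):
--   string = ""
--   for x in str1:
--     if x not in string:
--       string += x
--   for y in str2:
--     if y not in string:
--       string += y
--   close = sorted(string)
--   answer = ""
--   for x in close:
--     answer += x
--   return answer
-- ===== SOURCE B (Python) =====
-- def longest_string(str1, str2):
--     chars = sorted(str1 + str2)
--     out = []
--     prev = None
--     for c in chars:
--         if c != prev:
--             out.append(c)
--             prev = c
--     return "".join(out)
-- ===== Notes on version B (the rewrite author's own statement) =====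
-- stated objective: simpler
-- what changed: B sorts the concatenation first and removes duplicates in one adjacency pass (compare each char with the previous kept one), instead of A's membership-test dedup followed by a sort and a character-by-character rebuild.
import Mathlib
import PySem

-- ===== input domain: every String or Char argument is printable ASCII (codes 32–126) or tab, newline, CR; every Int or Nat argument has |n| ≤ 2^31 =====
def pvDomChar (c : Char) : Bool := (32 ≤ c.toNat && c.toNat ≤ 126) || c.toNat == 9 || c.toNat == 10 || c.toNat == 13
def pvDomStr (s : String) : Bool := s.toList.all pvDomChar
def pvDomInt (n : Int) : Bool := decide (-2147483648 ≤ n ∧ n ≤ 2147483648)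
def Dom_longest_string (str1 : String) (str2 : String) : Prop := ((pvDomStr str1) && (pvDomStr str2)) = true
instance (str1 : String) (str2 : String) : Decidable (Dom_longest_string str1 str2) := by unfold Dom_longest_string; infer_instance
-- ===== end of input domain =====

-- B sorts the concatenation first and dedups by a single adjacency pass, instead of A's
-- membership-test dedup followed by a sort; same return value, structurally different algorithm.

-- ===== PORT A =====
-- strings handled on the List Char side (PySem convention); 'x not in string' for a single
-- character is exactly list membership, 'string += x' is append, ''.join-style rebuild is the fold.
def longest_string (str1 : String) (str2 : String) : String :=
  let string1 := str1.toList.foldl (fun s x => if x ∈ s then s else s ++ [x]) []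
  let string2 := str2.toList.foldl (fun s y => if y ∈ s then s else s ++ [y]) string1
  let close := PySem.List.sorted string2 (fun x => x) false
  let answer := close.foldl (fun a x => a ++ [x]) ([] : List Char)
  String.ofList answer

-- ===== PORT B =====
def longest_string_alt (str1 : String) (str2 : String) : String :=
  let chars := PySem.List.sorted (str1.toList ++ str2.toList) (fun x => x) false
  let r := chars.foldl
    (fun (p : List Char × Option Char) c =>
      if some c ≠ p.2 then (p.1 ++ [c], some c) else p) ([], none)
  String.ofList r.1

-- ===== PRECONDITION & SPEC =====
def Spec_longest_string (str1 : String) (str2 : String) (out : String) : Prop := out = longest_string_alt str1 str2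
instance (str1 : String) (str2 : String) (out : String) : Decidable (Spec_longest_string str1 str2 out) := by unfold Spec_longest_string; infer_instance

-- ===== CLAIM (what is proved, stated in full; the proofs are below) =====
def Claim_equal_longest_string : Prop := ∀ (str1 : String) (str2 : String), Dom_longest_string str1 str2 → Spec_longest_string str1 str2 (longest_string str1 str2)

-- ===== LEMMAS AND PROOFS =====

-- B's dedup step of the sorted list, read off as a recursion on the list with the previous kept char.
def pvSdd : List Char → Char → List Char
  | [], _ => []
  | x :: xs, p => if x = p then pvSdd xs p else x :: pvSdd xs x

-- the fold in B's port computes pvSdd (plus the running "previous" component)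
def pvLastD : List Char → Char → Char
  | [], p => p
  | x :: xs, p => if x = p then pvLastD xs p else pvLastD xs x

lemma pvFold_eq_sdd (c : List Char) (acc : List Char) (p : Char) :
    c.foldl (fun (q : List Char × Option Char) ch =>
      if some ch ≠ q.2 then (q.1 ++ [ch], some ch) else q) (acc, some p)
    = (acc ++ pvSdd c p, some (pvLastD c p)) := by
  induction c generalizing acc p with
  | nil => simp [pvSdd, pvLastD]
  | cons x xs ih =>
    by_cases h : x = p
    · subst h
      simp only [List.foldl_cons, pvSdd, pvLastD]
      simpa using ih acc x
    · simp only [List.foldl_cons, pvSdd, pvLastD, if_neg h]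
      have hne : (if some x ≠ some p then (acc ++ [x], some x) else (acc, some p))
          = (acc ++ [x], some x) := by simp [h]
      rw [hne, ih]
      simp

lemma pvSdd_mem (c : List Char) (p : Char) (h : (p :: c).Pairwise (· ≤ ·)) :
    ∀ x, x ∈ pvSdd c p ↔ (x ∈ c ∧ x ≠ p) := by
  induction c generalizing p with
  | nil => simp [pvSdd]
  | cons y ys ih =>
    intro x
    rcases List.pairwise_cons.1 h with ⟨hp, hys⟩
    by_cases hyp : y = p
    · subst hyp
      have hstep : pvSdd (y :: ys) y = pvSdd ys y := by simp [pvSdd]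
      rw [hstep, ih y hys x]
      constructor
      · rintro ⟨hx, hxy⟩; exact ⟨List.mem_cons_of_mem _ hx, hxy⟩
      · rintro ⟨hx, hxy⟩
        rcases List.mem_cons.1 hx with rfl | hx
        · exact absurd rfl hxy
        · exact ⟨hx, hxy⟩
    · simp only [pvSdd, if_neg hyp]
      rw [List.mem_cons, ih y hys x]
      constructor
      · rintro (rfl | ⟨hx, hxy⟩)
        · exact ⟨List.mem_cons_self, hyp⟩
        · refine ⟨List.mem_cons_of_mem _ hx, ?_⟩
          intro hxp
          have h1 : p ≤ y := hp y List.mem_cons_self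
          have h2 : y ≤ x := (List.pairwise_cons.1 hys).1 x hx
          have h2' : y ≤ p := by rw [← hxp]; exact h2
          exact hyp (le_antisymm h2' h1)
      · rintro ⟨hx, hxp⟩
        rcases List.mem_cons.1 hx with rfl | hx
        · exact Or.inl rfl
        · by_cases hxy : x = y
          · exact Or.inl hxy
          · exact Or.inr ⟨hx, hxy⟩

lemma pvSdd_pairwise (c : List Char) (p : Char) (h : (p :: c).Pairwise (· ≤ ·)) :
    (pvSdd c p).Pairwise (· < ·) := by
  induction c generalizing p with
  | nil => simp [pvSdd]
  | cons y ys ih =>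
    rcases List.pairwise_cons.1 h with ⟨hp, hys⟩
    by_cases hyp : y = p
    · subst hyp; simpa [pvSdd] using ih y hys
    · simp only [pvSdd, if_neg hyp]
      refine List.pairwise_cons.2 ⟨?_, ih y hys⟩
      intro x hx
      rcases (pvSdd_mem ys y hys x).1 hx with ⟨hxys, hxy⟩
      exact lt_of_le_of_ne ((List.pairwise_cons.1 hys).1 x hxys) (fun hxy' => hxy hxy'.symm)

-- A's first-occurrence dedup fold: membership and nodup
lemma pvDedupFold_mem (l : List Char) (acc : List Char) :
    ∀ x, x ∈ l.foldl (fun s y => if y ∈ s then s else s ++ [y]) acc ↔ (x ∈ acc ∨ x ∈ l) := by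
  induction l generalizing acc with
  | nil => simp
  | cons y ys ih =>
    intro x
    by_cases h : y ∈ acc
    · simp only [List.foldl_cons, if_pos h]
      rw [ih acc x]
      constructor
      · rintro (hx | hx)
        · exact Or.inl hx
        · exact Or.inr (List.mem_cons_of_mem _ hx)
      · rintro (hx | hx)
        · exact Or.inl hx
        · rcases List.mem_cons.1 hx with rfl | hx
          · exact Or.inl h
          · exact Or.inr hx
    · simp only [List.foldl_cons, if_neg h]
      rw [ih (acc ++ [y]) x]
      simp [List.mem_cons, or_assoc, or_comm, or_left_comm]
  
lemma pvDedupFold_nodup (l : List Char) (acc : List Char) (h : acc.Nodup) :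
    (l.foldl (fun s y => if y ∈ s then s else s ++ [y]) acc).Nodup := by
  induction l generalizing acc with
  | nil => simpa
  | cons y ys ih =>
    by_cases hy : y ∈ acc
    · simpa [List.foldl_cons, if_pos hy] using ih acc h
    · refine ?_
      simp only [List.foldl_cons, if_neg hy]
      refine ih (acc ++ [y]) ?_
      exact h.append (List.nodup_singleton y) (List.disjoint_singleton.2 hy)

-- rebuilding a list by appending its characters one by one is the identity
lemma pvRebuild (c : List Char) (acc : List Char) :
    c.foldl (fun a x => a ++ [x]) acc = acc ++ c := by
  induction c generalizing acc with
  | nil => simp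
  | cons x xs ih => simp [List.foldl_cons, ih]

-- ===== VERDICT (by name: the statement is the Claim_ definition above) =====
theorem longest_string_spec : Claim_equal_longest_string := by
  intro str1 str2 _
  unfold Spec_longest_string longest_string longest_string_alt
  simp only []
  set l := str1.toList ++ str2.toList with hl
  -- A's deduplicated string over the whole concatenation
  have hfold : str2.toList.foldl (fun s y => if y ∈ s then s else s ++ [y])
      (str1.toList.foldl (fun s x => if x ∈ s then s else s ++ [x]) []) =
      l.foldl (fun s y => if y ∈ s then s else s ++ [y]) [] := by
    rw [hl, List.foldl_append]
  set d := l.foldl (fun s y => if y ∈ s then s else s ++ [y]) [] with hd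
  have hdnodup : d.Nodup := pvDedupFold_nodup l [] List.nodup_nil
  have hdmem : ∀ x, x ∈ d ↔ x ∈ l := by
    intro x; rw [hd, pvDedupFold_mem]; simp
  set chars := PySem.List.sorted l (fun x => x) false with hchars
  have hcp : chars.Pairwise (· ≤ ·) := by
    simpa using PySem.List.sorted_pairwise (xs := l) (key := fun x => x)
  -- compute B's fold result
  have hout : ∃ out : List Char,
      (chars.foldl (fun (p : List Char × Option Char) c =>
        if some c ≠ p.2 then (p.1 ++ [c], some c) else p) ([], none)).1 = out ∧
      out.Pairwise (· < ·) ∧ (∀ x, x ∈ out ↔ x ∈ chars) := by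
    cases hc : chars with
    | nil => exact ⟨[], by simp, by simp, by simp⟩
    | cons x xs =>
      have hxp : (x :: xs).Pairwise (· ≤ ·) := hc ▸ hcp
      refine ⟨x :: pvSdd xs x, ?_, ?_, ?_⟩
      · simp only [List.foldl_cons, if_pos (by simp : some x ≠ (none : Option Char))]
        rw [pvFold_eq_sdd]
        simp
      · refine List.pairwise_cons.2 ⟨?_, pvSdd_pairwise xs x hxp⟩
        intro y hy
        rcases (pvSdd_mem xs x hxp y).1 hy with ⟨hyxs, hyx⟩
        exact lt_of_le_of_ne ((List.pairwise_cons.1 hxp).1 y hyxs) (fun h => hyx h.symm)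
      · intro y
        rw [List.mem_cons, pvSdd_mem xs x hxp y]
        constructor
        · rintro (rfl | ⟨hy, _⟩)
          · exact List.mem_cons_self
          · exact List.mem_cons_of_mem _ hy
        · intro hy
          rcases List.mem_cons.1 hy with rfl | hy
          · exact Or.inl rfl
          · by_cases hxy : y = x
            · exact Or.inl hxy
            · exact Or.inr ⟨hy, hxy⟩
  rcases hout with ⟨out, houte, houtpw, houtmem⟩
  -- out is a strictly increasing rearrangement of d, hence sorted d = out
  have hperm : out.Perm d := by
    rw [List.perm_ext_iff_of_nodup houtpw.nodup hdnodup]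
    intro a
    rw [houtmem a, hdmem a, hchars, PySem.List.mem_sorted]
  have hsorted : PySem.List.sorted d (fun x => x) false = out :=
    PySem.List.sorted_eq_of_perm_of_pairwise_lt d out (fun x => x) hperm houtpw
  rw [hfold, pvRebuild, hsorted, houte]
  simp
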